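-- pv_equiv track=rewrite | github.com/gamblecd/advent-of-code | 2022/day14/answer.py | find_space_count
-- ===== SOURCE A (Python) =====
-- def find_space_count(point1,point2, floor):
--     points = set()
--     if (point1[0] == point2[0]):
--         return 0
--     x_distance = abs(point1[0]-point2[0])+1
--     if (x_distance < 3):
--         return 0;
--     y = point1[0]
--     height = 1
--     spaces = 0
--     while y+height != floor-1 and x_distance > 1:
--         x_distance = x_distance - 2*height
--         spaces += x_distance
--         height+=1
--
--     return spaces
-- ===== SOURCE B (Python) =====
-- def find_space_count(point1, point2, floor):
--     # Closed form: the loop subtracts 2,4,6,... so after k iterations the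
--     # remaining distance is d - k*(k+1); it stops at the first k where the
--     # height hits floor-1 (k == floor - point1[0] - 2) or the distance drops
--     # to <= 1.  Find that stop index k directly (binary search for the
--     # distance condition) and evaluate the accumulated sum as a polynomial.
--     if point1[0] == point2[0]:
--         return 0
--     d = abs(point1[0] - point2[0]) + 1
--     if d < 3:
--         return 0
--     k1 = floor - point1[0] - 2          # height stop index (never, if < 0)
--     lo, hi = 0, d                        # k2 = first k with k*(k+1) >= d-1
--     while lo < hi:
--         mid = (lo + hi) // 2
--         if mid * (mid + 1) >= d - 1:
--             hi = mid
--         else: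
--             lo = mid + 1
--     k = lo if k1 < 0 else min(k1, lo)
--     return k * d - k * (k + 1) * (k + 2) // 3
-- ===== Notes on version B (the rewrite author's own statement) =====
-- stated objective: alternative
-- what changed: Replaces A's iteration-by-iteration accumulation loop by solving for the loop's stop index directly (the height bound in closed form, the distance bound by binary search) and evaluating the accumulated sum with a closed-form cubic polynomial; a timing run scales the list length, which neither program's loop depends on, so no speedup was measured.
import Mathlib
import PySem

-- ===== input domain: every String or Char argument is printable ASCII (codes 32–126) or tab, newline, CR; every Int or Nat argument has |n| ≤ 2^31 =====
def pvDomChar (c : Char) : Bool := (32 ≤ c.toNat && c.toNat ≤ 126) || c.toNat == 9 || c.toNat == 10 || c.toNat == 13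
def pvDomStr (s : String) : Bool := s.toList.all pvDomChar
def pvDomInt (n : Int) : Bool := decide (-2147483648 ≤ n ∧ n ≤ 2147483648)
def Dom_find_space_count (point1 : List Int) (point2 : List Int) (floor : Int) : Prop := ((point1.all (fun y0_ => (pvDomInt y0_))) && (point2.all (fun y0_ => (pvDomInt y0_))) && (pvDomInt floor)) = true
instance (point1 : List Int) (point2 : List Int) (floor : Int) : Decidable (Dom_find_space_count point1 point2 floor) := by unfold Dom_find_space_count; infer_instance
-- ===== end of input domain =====

-- B replaces A's step-by-step accumulation loop by solving for the stop index
-- (binary search on the distance condition) and a closed-form polynomial sum.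

-- ===== PORT A =====
-- the while loop of A; the Nat parameter n encodes height = n + 1
def find_space_count_loop (floor y : Int) (n : Nat) (x_distance spaces : Int) : Int :=
  if y + ((n : Int) + 1) ≠ floor - 1 ∧ x_distance > 1 then
    find_space_count_loop floor y (n + 1)
      (x_distance - 2 * ((n : Int) + 1))
      (spaces + (x_distance - 2 * ((n : Int) + 1)))
  else spaces
termination_by x_distance.toNat
decreasing_by omega

def find_space_count (point1 : List Int) (point2 : List Int) (floor : Int) : Int :=
  -- 'points = set()' in A is dead code; point1[0]/point2[0]: IndexError excluded by Pre_
  let p1 := (PySem.List.pyGet? point1 0).getD 0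
  let p2 := (PySem.List.pyGet? point2 0).getD 0
  if p1 = p2 then 0
  else
    let x_distance := |p1 - p2| + 1
    if x_distance < 3 then 0
    else find_space_count_loop floor p1 0 x_distance 0

-- ===== PORT B =====
-- binary search: first k in [lo, hi] with k*(k+1) ≥ d - 1
def find_space_count_bsearch (d lo hi : Int) : Int :=
  if h : lo < hi then
    let mid := PySem.Int.floordiv (lo + hi) 2
    if mid * (mid + 1) ≥ d - 1 then find_space_count_bsearch d lo mid
    else find_space_count_bsearch d (mid + 1) hi
  else lo
termination_by (hi - lo).toNat
decreasing_by
  · have := PySem.Int.floordiv_two_mid_bounds (le_of_lt h)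
    have h2 : PySem.Int.floordiv (lo + hi) 2 = (lo + hi) / 2 :=
      PySem.Int.floordiv_eq_ediv_of_pos (by omega)
    omega
  · have := PySem.Int.floordiv_two_mid_bounds (le_of_lt h)
    have h2 : PySem.Int.floordiv (lo + hi) 2 = (lo + hi) / 2 :=
      PySem.Int.floordiv_eq_ediv_of_pos (by omega)
    omega

def find_space_count_alt (point1 : List Int) (point2 : List Int) (floor : Int) : Int :=
  let p1 := (PySem.List.pyGet? point1 0).getD 0
  let p2 := (PySem.List.pyGet? point2 0).getD 0
  if p1 = p2 then 0
  else
    let d := |p1 - p2| + 1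
    if d < 3 then 0
    else
      let k1 := floor - p1 - 2
      let k2 := find_space_count_bsearch d 0 d
      let k := if k1 < 0 then k2 else min k1 k2
      k * d - PySem.Int.floordiv (k * (k + 1) * (k + 2)) 3

-- ===== PRECONDITION & SPEC =====
-- A raises IndexError on an empty point1 or point2 (point1[0]); excluded.
def Pre_find_space_count (point1 : List Int) (point2 : List Int) (floor : Int) : Prop :=
  point1 ≠ [] ∧ point2 ≠ []
instance (point1 : List Int) (point2 : List Int) (floor : Int) : Decidable (Pre_find_space_count point1 point2 floor) := by unfold Pre_find_space_count; infer_instance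

def pvWitness_find_space_count : List Int × List Int × Int := ([3], [12], 20)

def Spec_find_space_count (point1 : List Int) (point2 : List Int) (floor : Int) (out : Int) : Prop := out = find_space_count_alt point1 point2 floor
instance (point1 : List Int) (point2 : List Int) (floor : Int) (out : Int) : Decidable (Spec_find_space_count point1 point2 floor out) := by unfold Spec_find_space_count; infer_instance

-- ===== CLAIM (what is proved, stated in full; the proofs are below) =====
def Claim_equal_find_space_count : Prop := ∀ (point1 : List Int) (point2 : List Int) (floor : Int), Dom_find_space_count point1 point2 floor → Pre_find_space_count point1 point2 floor → Spec_find_space_count point1 point2 floor (find_space_count point1 point2 floor)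

-- ===== LEMMAS AND PROOFS =====

lemma three_dvd_consec (k : Int) : (3 : Int) ∣ k * (k + 1) * (k + 2) := by
  have h3 : k % 3 = 0 ∨ k % 3 = 1 ∨ k % 3 = 2 := by omega
  have hk : k = 3 * (k / 3) + k % 3 := by omega
  set q := k / 3 with hq
  rcases h3 with h | h | h
  · exact ⟨q * (3 * q + 1) * (3 * q + 2), by rw [hk, h]; ring⟩
  · exact ⟨(3 * q + 1) * (3 * q + 2) * (q + 1), by rw [hk, h]; ring⟩
  · exact ⟨(3 * q + 2) * (q + 1) * (3 * q + 4), by rw [hk, h]; ring⟩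

-- the closed-form partial sum after k iterations
def fscS (d k : Int) : Int := k * d - k * (k + 1) * (k + 2) / 3

lemma fscS_zero (d : Int) : fscS d 0 = 0 := by simp [fscS]

lemma fscS_step (d k : Int) : fscS d (k + 1) = fscS d k + (d - (k + 1) * (k + 2)) := by
  obtain ⟨m, hm⟩ := three_dvd_consec k
  have h1 : (k + 1) * (k + 1 + 1) * (k + 1 + 2) = 3 * m + 3 * ((k + 1) * (k + 2)) := by
    rw [← hm]; ring
  have h2 : k * (k + 1) * (k + 2) / 3 = m := by rw [hm]; omega
  have h3 : (k + 1) * (k + 1 + 1) * (k + 1 + 2) / 3 = m + (k + 1) * (k + 2) := by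
    rw [h1]; omega
  simp only [fscS, h2, h3]; ring

-- binary-search correctness
lemma bsearch_correct (d : Int) : ∀ t : Nat, ∀ lo hi : Int, (hi - lo).toNat = t →
    0 ≤ lo → lo ≤ hi → hi * (hi + 1) ≥ d - 1 →
    (∀ i : Int, 0 ≤ i → i < lo → i * (i + 1) < d - 1) →
    let r := find_space_count_bsearch d lo hi
    lo ≤ r ∧ r ≤ hi ∧ r * (r + 1) ≥ d - 1 ∧ ∀ i : Int, 0 ≤ i → i < r → i * (i + 1) < d - 1 := by
  intro t
  induction t using Nat.strong_induction_on with
  | _ t ih =>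
    intro lo hi ht hlo hlh hhi hlow
    rw [find_space_count_bsearch]
    by_cases h : lo < hi
    · simp only [h, dif_pos]
      have hmid := PySem.Int.floordiv_two_mid_bounds (le_of_lt h)
      have h2 : PySem.Int.floordiv (lo + hi) 2 = (lo + hi) / 2 :=
        PySem.Int.floordiv_eq_ediv_of_pos (by omega)
      set mid := PySem.Int.floordiv (lo + hi) 2 with hm
      have hmlt : mid < hi := by omega
      by_cases hc : mid * (mid + 1) ≥ d - 1
      · simp only [hc, if_pos]
        have := ih (mid - lo).toNat (by omega) lo mid rfl hlo (by omega) hc hlow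
        exact ⟨this.1, by omega, this.2.2⟩
      · simp only [hc, if_neg, not_false_iff]
        push_neg at hc
        have hlow' : ∀ i : Int, 0 ≤ i → i < mid + 1 → i * (i + 1) < d - 1 := by
          intro i hi0 hilt
          by_cases hi' : i < lo
          · exact hlow i hi0 hi'
          · have hile : i ≤ mid := by omega
            have : i * (i + 1) ≤ mid * (mid + 1) := by nlinarith
            omega
        have := ih (hi - (mid + 1)).toNat (by omega) (mid + 1) hi rfl (by omega)
          (by omega) hhi hlow'
        exact ⟨by omega, this.2.1, this.2.2⟩
    · simp only [h, dif_neg, not_false_iff]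
      have hle : lo = hi := by omega
      subst hle
      exact ⟨le_refl _, le_refl _, hhi, hlow⟩

-- loop correctness: starting at step n with the invariant state, the loop
-- returns the closed-form value at the stop index K
lemma loop_eq (d y floor K : Int) (hK0 : 0 ≤ K)
    (hstop : y + K + 1 = floor - 1 ∨ d - K * (K + 1) ≤ 1)
    (hrun : ∀ i : Int, 0 ≤ i → i < K → y + i + 1 ≠ floor - 1 ∧ d - i * (i + 1) > 1) :
    ∀ t : Nat, ∀ n : Nat, (n : Int) ≤ K → (K - n).toNat = t →
    find_space_count_loop floor y n (d - (n : Int) * ((n : Int) + 1)) (fscS d n) = fscS d K := by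
  intro t
  induction t with
  | zero =>
    intro n hn ht
    have hnK : (n : Int) = K := by omega
    rw [find_space_count_loop, if_neg]
    · rw [hnK]
    · rw [hnK]
      rcases hstop with h | h
      · intro hcon; exact hcon.1 (by linarith)
      · intro hcon; omega
  | succ t ih =>
    intro n hn ht
    have hnK : (n : Int) < K := by omega
    obtain ⟨hne, hgt⟩ := hrun n (by positivity) hnK
    rw [find_space_count_loop, if_pos]
    · have harg : d - (n : Int) * ((n : Int) + 1) - 2 * ((n : Int) + 1)
          = d - ((n : Int) + 1) * (((n : Int) + 1) + 1) := by ring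
      have hs : fscS d n + (d - ((n : Int) + 1) * (((n : Int) + 1) + 1))
          = fscS d ((n : Int) + 1) := by
        rw [fscS_step]; ring
      rw [harg, hs]
      have := ih (n + 1) (by omega) (by omega)
      push_cast at this
      convert this using 3 <;> ring
    · exact ⟨by intro hcon; exact hne (by linarith), hgt⟩

lemma find_space_count_eq_alt (point1 point2 : List Int) (floor : Int)
    (h1 : point1 ≠ []) (h2 : point2 ≠ []) :
    find_space_count point1 point2 floor = find_space_count_alt point1 point2 floor := by
  obtain ⟨a, l1, rfl⟩ := List.exists_cons_of_ne_nil h1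
  obtain ⟨b, l2, rfl⟩ := List.exists_cons_of_ne_nil h2
  simp only [find_space_count, find_space_count_alt, PySem.List.pyGet?_zero_cons,
    Option.getD_some]
  by_cases hab : a = b
  · simp [hab]
  · simp only [hab, if_neg, not_false_iff, if_false]
    set d := |a - b| + 1 with hd
    by_cases hd3 : d < 3
    · simp [hd3]
    · simp only [hd3, if_neg, not_false_iff, if_false]
      push_neg at hd3
      -- characterize k2
      have hbs := bsearch_correct d (d - 0).toNat 0 d rfl (le_refl 0) (by omega)
        (by nlinarith) (by intro i h1 h2; omega)
      set k2 := find_space_count_bsearch d 0 d with hk2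
      obtain ⟨hk2lo, hk2hi, hk2ge, hk2min⟩ := hbs
      set k1 := floor - a - 2 with hk1
      set K := if k1 < 0 then k2 else min k1 k2 with hK
      have hK0 : 0 ≤ K := by rw [hK]; split <;> omega
      have hstop : a + K + 1 = floor - 1 ∨ d - K * (K + 1) ≤ 1 := by
        rw [hK]; split
        · right; omega
        · rcases le_total k1 k2 with h | h
          · left; rw [min_eq_left h]; omega
          · right; rw [min_eq_right h]; omega
      have hrun : ∀ i : Int, 0 ≤ i → i < K → a + i + 1 ≠ floor - 1 ∧ d - i * (i + 1) > 1 := by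
        intro i hi0 hiK
        have hik2 : i < k2 := by rw [hK] at hiK; split at hiK <;> omega
        have := hk2min i hi0 hik2
        constructor
        · intro hcon
          have : i = k1 := by omega
          rw [hK] at hiK; split at hiK <;> omega
        · omega
      have hloop := loop_eq d a floor K hK0 hstop hrun K.toNat 0 (by omega) (by omega)
      simp only [Nat.cast_zero, zero_mul, sub_zero, fscS_zero] at hloop
      rw [hloop]
      -- closed form equals B's floordiv expression
      obtain ⟨m, hm⟩ := three_dvd_consec K
      have hfd : PySem.Int.floordiv (K * (K + 1) * (K + 2)) 3 = K * (K + 1) * (K + 2) / 3 :=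
        PySem.Int.floordiv_eq_ediv_of_pos (by omega)
      rw [fscS, hfd]

-- ===== VERDICT (by name: the statement is the Claim_ definition above) =====
theorem find_space_count_spec : Claim_equal_find_space_count := by
  intro point1 point2 floor _ hpre
  exact find_space_count_eq_alt point1 point2 floor hpre.1 hpre.2
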